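-- pv_equiv track=rewrite | github.com/yaneurao/Pytra | test/py/case57_loop.py | calc_57
-- ===== SOURCE A (Python) =====
-- def calc_57(values: list[int]) -> int:
--     total: int = 0
--     for v in values:
--         if v % 2 == 0:
--             total = total + v
--         else:
--             total = total + (v * 2)
--     return total
-- ===== SOURCE B (Python) =====
-- def calc_57(values: list[int]) -> int:
--     return sum(values) + sum(v for v in values if v % 2 != 0)
-- ===== Notes on version B (the rewrite author's own statement) =====
-- stated objective: simpler
-- what changed: Replaces the single accumulator loop with a per-element even/odd branch by two sums (base sum plus an extra sum of the odd elements), using 2v = v + v.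
import Mathlib
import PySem

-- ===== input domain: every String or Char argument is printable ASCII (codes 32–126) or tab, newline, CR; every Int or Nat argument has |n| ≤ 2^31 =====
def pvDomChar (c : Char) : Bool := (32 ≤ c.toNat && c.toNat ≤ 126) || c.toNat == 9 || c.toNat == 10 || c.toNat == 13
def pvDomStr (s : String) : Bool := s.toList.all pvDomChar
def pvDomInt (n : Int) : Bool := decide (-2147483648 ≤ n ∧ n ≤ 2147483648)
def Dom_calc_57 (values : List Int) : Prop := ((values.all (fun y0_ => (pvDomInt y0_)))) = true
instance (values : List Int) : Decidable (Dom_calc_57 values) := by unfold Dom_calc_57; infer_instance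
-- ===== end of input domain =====

-- ===== PORT A =====
-- B changes: two sums (base sum + sum of odd elements) instead of one accumulator with a branch (objective: simpler).
def calc_57 (values : List Int) : Int :=
  values.foldl (fun total v => if v % 2 == 0 then total + v else total + v * 2) 0

-- ===== PORT B =====
def calc_57_alt (values : List Int) : Int :=
  values.sum + (values.filter (fun v => v % 2 != 0)).sum

-- ===== PRECONDITION & SPEC =====
def Spec_calc_57 (values : List Int) (out : Int) : Prop := out = calc_57_alt values
instance (values : List Int) (out : Int) : Decidable (Spec_calc_57 values out) := by unfold Spec_calc_57; infer_instance

-- ===== CLAIM (what is proved, stated in full; the proofs are below) =====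
def Claim_equal_calc_57 : Prop := ∀ (values : List Int), Dom_calc_57 values → Spec_calc_57 values (calc_57 values)

-- ===== LEMMAS AND PROOFS =====

-- ===== VERDICT (by name: the statement is the Claim_ definition above) =====
theorem calc_57_foldl (values : List Int) (t : Int) :
    values.foldl (fun total v => if v % 2 == 0 then total + v else total + v * 2) t
      = t + values.sum + (values.filter (fun v => v % 2 != 0)).sum := by
  induction values generalizing t with
  | nil => simp
  | cons x xs ih =>
    simp only [List.foldl_cons, List.filter_cons, List.sum_cons, ih]
    by_cases h : x % 2 == 0 <;> simp [h]
    · have h' : x % 2 = 0 := by simpa using h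
      rw [if_neg (by omega : ¬ x % 2 = 1)]; ring
    · have h' : x % 2 ≠ 0 := by simpa using h
      rw [if_pos (by omega : x % 2 = 1), List.sum_cons]; ring

theorem calc_57_spec : Claim_equal_calc_57 := by
  intro values _
  unfold Spec_calc_57 calc_57 calc_57_alt
  rw [calc_57_foldl]; ring
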